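-- pv_equiv track=rewrite | github.com/onnsapphir0-create/arvi-calculator | app.py | compute_Rw_from_curve
-- ===== SOURCE A (Python) =====
-- REFERENCE_CURVE = {
--     100: 33, 125: 36, 160: 39, 200: 42, 250: 45, 315: 48, 400: 51, 500: 52,
--     630: 53, 800: 54, 1000: 55, 1250: 56, 1600: 56, 2000: 56, 2500: 56, 3150: 56
-- }
--
-- def compute_Rw_from_curve(calc_curve, freqs, ref_curve):
--     """
--     Вычисляет индекс Rw путём сравнения расчётной кривой с оценочной.
--     Возвращает Rw, смещение и сумму неблагоприятных отклонений.
--     """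
--     # Сначала без смещения
--     deviations = [calc_curve[i] - ref_curve[i] for i in range(len(freqs))]
--     unfav_sum = sum(-d for d in deviations if d < 0)
--     if unfav_sum <= 32:
--         return int(round(ref_curve[freqs.index(500)] if 500 in freqs else ref_curve[0])), 0, unfav_sum
--     # Требуется смещение вниз
--     shift = 0
--     while unfav_sum > 32:
--         shift += 1
--         new_ref = [r - shift for r in ref_curve]
--         deviations = [calc_curve[i] - new_ref[i] for i in range(len(freqs))]
--         unfav_sum = sum(-d for d in deviations if d < 0)
--     Rw = (REFERENCE_CURVE[500] if 500 in REFERENCE_CURVE else REFERENCE_CURVE[min(REFERENCE_CURVE.keys())]) - shift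
--     return int(round(Rw)), -shift, unfav_sum
-- ===== SOURCE B (Python) =====
-- REFERENCE_CURVE = {
--     100: 33, 125: 36, 160: 39, 200: 42, 250: 45, 315: 48, 400: 51, 500: 52,
--     630: 53, 800: 54, 1000: 55, 1250: 56, 1600: 56, 2000: 56, 2500: 56, 3150: 56
-- }
--
-- def compute_Rw_from_curve(calc_curve, freqs, ref_curve):
--     # shortfalls: how far the calculated curve falls below the reference at each band
--     d = [ref_curve[i] - calc_curve[i] for i in range(len(freqs))]
--
--     def unfav(s):
--         # unfavorable-deviation sum for the reference curve shifted down by s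
--         return sum(x - s for x in d if x > s)
--
--     u0 = unfav(0)
--     if u0 <= 32:
--         rw = ref_curve[freqs.index(500)] if 500 in freqs else ref_curve[0]
--         return int(rw), 0, u0
--     # binary search for the least shift s >= 1 with unfav(s) <= 32
--     # (unfav is nonincreasing; unfav(max(d)) = 0, and max(d) >= 1 since u0 > 32)
--     lo, hi = 0, max(d)
--     while hi - lo > 1:
--         mid = (lo + hi) // 2
--         if unfav(mid) <= 32:
--             hi = mid
--         else:
--             lo = mid
--     return 52 - hi, -hi, unfav(hi)
-- ===== Notes on version B (the rewrite author's own statement) =====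
-- stated objective: faster
-- what changed: A finds the downward shift by incrementing it one dB at a time and recomputing the whole unfavorable-deviation sum each step; B computes the shortfalls once and binary-searches the least shift with unfavorable sum <= 32, exploiting that the sum is nonincreasing in the shift.
import Mathlib
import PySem

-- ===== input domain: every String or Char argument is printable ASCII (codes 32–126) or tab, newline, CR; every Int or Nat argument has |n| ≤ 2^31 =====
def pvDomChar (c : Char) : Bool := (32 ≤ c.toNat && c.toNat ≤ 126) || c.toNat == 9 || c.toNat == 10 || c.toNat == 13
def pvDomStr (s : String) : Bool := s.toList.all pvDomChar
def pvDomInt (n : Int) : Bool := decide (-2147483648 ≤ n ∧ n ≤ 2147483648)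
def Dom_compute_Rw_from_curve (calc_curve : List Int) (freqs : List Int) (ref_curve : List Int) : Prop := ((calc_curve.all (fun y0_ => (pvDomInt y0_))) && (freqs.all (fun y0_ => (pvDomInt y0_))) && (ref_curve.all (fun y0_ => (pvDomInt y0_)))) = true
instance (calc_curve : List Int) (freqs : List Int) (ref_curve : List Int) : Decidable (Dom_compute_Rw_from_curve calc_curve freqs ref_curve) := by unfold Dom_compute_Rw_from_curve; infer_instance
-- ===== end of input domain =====

-- B replaces A's one-dB-at-a-time search for the downward shift by a binary search over the
-- shift (the unfavorable-deviation sum is nonincreasing in the shift): asymptotically faster.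

-- ===== PORT A =====

-- the module-level REFERENCE_CURVE dict
def pvRefDict : PySem.Dict Int Int := PySem.Dict.ofList
  [(100, 33), (125, 36), (160, 39), (200, 42), (250, 45), (315, 48), (400, 51), (500, 52),
   (630, 53), (800, 54), (1000, 55), (1250, 56), (1600, 56), (2000, 56), (2500, 56), (3150, 56)]

-- sum(-d for d in deviations if d < 0)
def pvUnfavA (devs : List Int) : Int :=
  devs.foldl (fun acc dv => if dv < 0 then acc + -dv else acc) 0

-- A's while loop; `fuel` is only a totality guard (under Pre_ the supplied fuel is enough,
-- because the unfavorable sum strictly decreases each iteration while it exceeds 32).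
def pvLoopA (calc_curve ref_curve : List Int) (n : Nat) : Nat → Int → Int × Int
  | 0, shift => (shift, 0)
  | fuel + 1, shift =>
    let s := shift + 1
    let new_ref := ref_curve.map (fun r => r - s)
    let devs := (List.range n).map
      (fun i => PySem.List.pyGetD calc_curve (i : Int) 0 - PySem.List.pyGetD new_ref (i : Int) 0)
    let u := pvUnfavA devs
    if u > 32 then pvLoopA calc_curve ref_curve n fuel s else (s, u)

-- `int(round(x))` on an int x is x itself, so it is omitted.
def compute_Rw_from_curve (calc_curve : List Int) (freqs : List Int) (ref_curve : List Int) : Int × Int × Int :=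
  let n := freqs.length
  let deviations := (List.range n).map
    (fun i => PySem.List.pyGetD calc_curve (i : Int) 0 - PySem.List.pyGetD ref_curve (i : Int) 0)
  let unfav_sum := pvUnfavA deviations
  if unfav_sum ≤ 32 then
    ((if freqs.contains 500
        then PySem.List.pyGetD ref_curve (((PySem.List.index? freqs 500).getD 0 : Nat) : Int) 0
        else PySem.List.pyGetD ref_curve 0 0), 0, unfav_sum)
  else
    let p := pvLoopA calc_curve ref_curve n unfav_sum.toNat 0
    let rw := (if (pvRefDict.get? 500).isSome then (pvRefDict.get? 500).getD 0
               else (pvRefDict.get? ((PySem.List.min? pvRefDict.keys (fun y => y)).getD 0)).getD 0) - p.1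
    (rw, -p.1, p.2)

-- ===== PORT B =====

-- sum(x - s for x in d if x > s)
def pvUnfavB (d : List Int) (s : Int) : Int :=
  d.foldl (fun acc x => if x > s then acc + (x - s) else acc) 0

-- the binary-search loop of B; `fuel` is only a totality guard (hi - lo shrinks every
-- iteration, so `(hi - lo).toNat` steps always suffice; the call site supplies that).
def pvBsearch (d : List Int) : Nat → Int → Int → Int
  | 0, _, hi => hi
  | fuel + 1, lo, hi =>
    if 1 < hi - lo then
      let mid := PySem.Int.floordiv (lo + hi) 2
      if pvUnfavB d mid ≤ 32 then pvBsearch d fuel lo mid else pvBsearch d fuel mid hi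
    else hi

def compute_Rw_from_curve_alt (calc_curve : List Int) (freqs : List Int) (ref_curve : List Int) : Int × Int × Int :=
  let n := freqs.length
  let d := (List.range n).map
    (fun i => PySem.List.pyGetD ref_curve (i : Int) 0 - PySem.List.pyGetD calc_curve (i : Int) 0)
  let u0 := pvUnfavB d 0
  if u0 ≤ 32 then
    ((if freqs.contains 500
        then PySem.List.pyGetD ref_curve (((PySem.List.index? freqs 500).getD 0 : Nat) : Int) 0
        else PySem.List.pyGetD ref_curve 0 0), 0, u0)
  else
    let hi0 := (PySem.List.max? d (fun y => y)).getD 0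
    let hfin := pvBsearch d (hi0 - 0).toNat 0 hi0
    (52 - hfin, -hfin, pvUnfavB d hfin)

-- ===== PRECONDITION & SPEC =====
-- Pre_ excludes exactly the inputs on which A raises IndexError: len(freqs) exceeding the
-- length of calc_curve or ref_curve (the deviations comprehension), or an empty ref_curve
-- (then freqs is empty, deviations sum to 0 and ref_curve[0] is evaluated).
def Pre_compute_Rw_from_curve (calc_curve : List Int) (freqs : List Int) (ref_curve : List Int) : Prop :=
  freqs.length ≤ calc_curve.length ∧ freqs.length ≤ ref_curve.length ∧ ref_curve ≠ []
instance (calc_curve : List Int) (freqs : List Int) (ref_curve : List Int) : Decidable (Pre_compute_Rw_from_curve calc_curve freqs ref_curve) := by unfold Pre_compute_Rw_from_curve; infer_instance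

def pvWitness_compute_Rw_from_curve : List Int × List Int × List Int := ([10, 20], [500, 1000], [52, 55])

def Spec_compute_Rw_from_curve (calc_curve : List Int) (freqs : List Int) (ref_curve : List Int) (out : Int × Int × Int) : Prop := out = compute_Rw_from_curve_alt calc_curve freqs ref_curve
instance (calc_curve : List Int) (freqs : List Int) (ref_curve : List Int) (out : Int × Int × Int) : Decidable (Spec_compute_Rw_from_curve calc_curve freqs ref_curve out) := by unfold Spec_compute_Rw_from_curve; infer_instance

-- ===== CLAIM (what is proved, stated in full; the proofs are below) =====
def Claim_equal_compute_Rw_from_curve : Prop := ∀ (calc_curve : List Int) (freqs : List Int) (ref_curve : List Int), Dom_compute_Rw_from_curve calc_curve freqs ref_curve → Pre_compute_Rw_from_curve calc_curve freqs ref_curve → Spec_compute_Rw_from_curve calc_curve freqs ref_curve (compute_Rw_from_curve calc_curve freqs ref_curve)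

-- ===== LEMMAS AND PROOFS =====

-- the unfavorable sum as a sum of clamped shortfalls
def pvG (d : List Int) (s : Int) : Int := (d.map (fun x => max (x - s) 0)).sum

theorem pvUnfavB_fold (d : List Int) (s acc : Int) :
    d.foldl (fun a x => if x > s then a + (x - s) else a) acc = acc + pvG d s := by
  induction d generalizing acc with
  | nil => simp [pvG]
  | cons h t ih => simp only [List.foldl_cons, pvG, List.map_cons, List.sum_cons] at *; rw [ih]; split_ifs <;> omega

theorem pvUnfavB_eq (d : List Int) (s : Int) : pvUnfavB d s = pvG d s := by
  unfold pvUnfavB; rw [pvUnfavB_fold]; omega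

theorem pvG_nonneg (d : List Int) (s : Int) : 0 ≤ pvG d s := by
  induction d with
  | nil => simp [pvG]
  | cons h t ih => simp only [pvG, List.map_cons, List.sum_cons] at *; omega

theorem pvG_mono (d : List Int) {s t : Int} (hst : s ≤ t) : pvG d t ≤ pvG d s := by
  induction d with
  | nil => simp [pvG]
  | cons h l ih => simp only [pvG, List.map_cons, List.sum_cons] at *; omega

theorem pvG_strict (d : List Int) {s : Int} (hpos : 0 < pvG d s) : pvG d (s + 1) < pvG d s := by
  induction d with
  | nil => simp [pvG] at hpos
  | cons h l ih =>
    have hn := pvG_nonneg l s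
    have hm := pvG_mono l (show s ≤ s + 1 by omega)
    simp only [pvG, List.map_cons, List.sum_cons] at *
    by_cases hl : 0 < (l.map (fun x => max (x - s) 0)).sum
    · have := ih hl; omega
    · omega

theorem pvG_zero (d : List Int) {s : Int} (hall : ∀ x ∈ d, x ≤ s) : pvG d s = 0 := by
  induction d with
  | nil => simp [pvG]
  | cons h l ih =>
    have h1 := hall h (by simp)
    have h2 := ih (fun x hx => hall x (by simp [hx]))
    simp only [pvG, List.map_cons, List.sum_cons] at *
    omega

theorem pvG_pos_mem (d : List Int) {s : Int} (hpos : 0 < pvG d s) : ∃ x ∈ d, s < x := by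
  induction d with
  | nil => simp [pvG] at hpos
  | cons h l ih =>
    by_cases hh : s < h
    · exact ⟨h, by simp, hh⟩
    · have hn : max (h - s) 0 = 0 := by omega
      simp only [pvG, List.map_cons, List.sum_cons, hn, zero_add] at hpos
      obtain ⟨x, hx, hsx⟩ := ih hpos
      exact ⟨x, by simp [hx], hsx⟩

-- bridge: A's unfavorable sum over deviations (s - x) equals B's over shortfalls x
theorem pvBridge_fold (d : List Int) (s : Int) :
    pvUnfavA (d.map (fun x => s - x)) = pvUnfavB d s := by
  unfold pvUnfavA pvUnfavB
  rw [List.foldl_map]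
  congr 1
  funext acc x
  split_ifs <;> omega

-- the deviations A builds in its loop are s - (B's shortfalls), given enough reference bands
theorem pvDevs_eq (calc_curve ref_curve : List Int) {n : Nat} (hn : n ≤ ref_curve.length) (s : Int) :
    (List.range n).map
      (fun i => PySem.List.pyGetD calc_curve (i : Int) 0 -
                PySem.List.pyGetD (ref_curve.map (fun r => r - s)) (i : Int) 0)
    = ((List.range n).map
        (fun i => PySem.List.pyGetD ref_curve (i : Int) 0 - PySem.List.pyGetD calc_curve (i : Int) 0)).map
        (fun x => s - x) := by
  rw [List.map_map]
  apply List.map_congr_left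
  intro i hi
  obtain ⟨a, ha, rfl⟩ : ∃ a, a < n ∧ i = (a : Int) := by simpa using hi
  have hilt : a < ref_curve.length := lt_of_lt_of_le ha hn
  have hilt2 : a < (ref_curve.map (fun r => r - s)).length := by simpa using hilt
  simp only [Function.comp, PySem.List.pyGetD_natCast]
  rw [List.getD_eq_getElem _ _ hilt2, List.getD_eq_getElem _ _ hilt, List.getElem_map]
  omega

theorem pvBridge0 (calc_curve ref_curve : List Int) (n : Nat) :
    pvUnfavA ((List.range n).map
      (fun i => PySem.List.pyGetD calc_curve (i : Int) 0 - PySem.List.pyGetD ref_curve (i : Int) 0))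
    = pvUnfavB ((List.range n).map
      (fun i => PySem.List.pyGetD ref_curve (i : Int) 0 - PySem.List.pyGetD calc_curve (i : Int) 0)) 0 := by
  rw [← pvBridge_fold]
  congr 1
  rw [List.map_map]
  apply List.map_congr_left
  intro i _
  simp only [Function.comp]
  omega

-- characterization of A's while loop: it returns the first shift past `shift` whose
-- unfavorable sum is ≤ 32, together with that sum
theorem pvLoopA_char (calc_curve ref_curve : List Int) (n : Nat) (d : List Int)
    (hb : ∀ s : Int, pvUnfavA ((List.range n).map
      (fun i => PySem.List.pyGetD calc_curve (i : Int) 0 -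
                PySem.List.pyGetD (ref_curve.map (fun r => r - s)) (i : Int) 0)) = pvUnfavB d s) :
    ∀ (fuel : Nat) (shift : Int), pvUnfavB d (shift + 1) ≤ 32 + fuel →
      (pvLoopA calc_curve ref_curve n (fuel + 1) shift).2
        = pvUnfavB d (pvLoopA calc_curve ref_curve n (fuel + 1) shift).1 ∧
      (pvLoopA calc_curve ref_curve n (fuel + 1) shift).2 ≤ 32 ∧
      shift < (pvLoopA calc_curve ref_curve n (fuel + 1) shift).1 ∧
      (∀ t : Int, shift < t → t < (pvLoopA calc_curve ref_curve n (fuel + 1) shift).1 →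
        32 < pvUnfavB d t) := by
  intro fuel
  induction fuel with
  | zero =>
    intro shift hle
    simp only [pvLoopA, hb]
    rw [if_neg (by omega)]
    refine ⟨rfl, by omega, by omega, ?_⟩
    intro t h1 h2
    omega
  | succ fuel ih =>
    intro shift hle
    have hunf : pvLoopA calc_curve ref_curve n (fuel + 1 + 1) shift
        = if pvUnfavB d (shift + 1) > 32
          then pvLoopA calc_curve ref_curve n (fuel + 1) (shift + 1)
          else (shift + 1, pvUnfavB d (shift + 1)) := by
      simp only [pvLoopA, hb]
    rw [hunf]
    by_cases h32 : pvUnfavB d (shift + 1) > 32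
    · rw [if_pos h32]
      have hstep : pvUnfavB d (shift + 1 + 1) < pvUnfavB d (shift + 1) := by
        rw [pvUnfavB_eq, pvUnfavB_eq]
        exact pvG_strict d (by rw [← pvUnfavB_eq]; omega)
      obtain ⟨h1, h2, h3, h4⟩ := ih (shift + 1) (by omega)
      refine ⟨h1, h2, by omega, ?_⟩
      intro t ht1 ht2
      by_cases hts : t = shift + 1
      · rw [hts]; omega
      · exact h4 t (by omega) ht2
    · rw [if_neg h32]
      exact ⟨rfl, by omega, by omega, by intro t h1 h2; omega⟩

-- characterization of B's binary search
theorem pvBsearch_char (d : List Int) :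
    ∀ (fuel : Nat) (lo hi : Int), (hi - lo).toNat ≤ fuel → lo < hi →
      32 < pvUnfavB d lo → pvUnfavB d hi ≤ 32 →
      lo < pvBsearch d fuel lo hi ∧ pvBsearch d fuel lo hi ≤ hi ∧
      pvUnfavB d (pvBsearch d fuel lo hi) ≤ 32 ∧ 32 < pvUnfavB d (pvBsearch d fuel lo hi - 1) := by
  intro fuel
  induction fuel with
  | zero => intro lo hi hk hlt _ _; omega
  | succ fuel ih =>
    intro lo hi hk hlt hlo hhi
    simp only [pvBsearch]
    by_cases hgap : 1 < hi - lo
    · rw [if_pos hgap]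
      have hmid : lo < PySem.Int.floordiv (lo + hi) 2 ∧ PySem.Int.floordiv (lo + hi) 2 < hi := by
        rw [PySem.Int.floordiv_eq_ediv_of_pos (show (0:Int) < 2 by omega)]
        omega
      by_cases hm : pvUnfavB d (PySem.Int.floordiv (lo + hi) 2) ≤ 32
      · simp only [hm, if_pos]
        have := ih lo (PySem.Int.floordiv (lo + hi) 2) (by omega) (by omega) hlo hm
        exact ⟨this.1, by omega, this.2.2⟩
      · simp only [hm, if_false]
        have := ih (PySem.Int.floordiv (lo + hi) 2) hi (by omega) (by omega) (by omega) hhi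
        exact ⟨by omega, this.2.1, this.2.2⟩
    · rw [if_neg hgap]
      have : hi = lo + 1 := by omega
      refine ⟨by omega, by omega, hhi, by rw [this]; simpa using hlo⟩

-- the least shift with unfavorable sum ≤ 32 is unique
theorem pvUnique (d : List Int) {s1 s2 : Int}
    (h1 : pvUnfavB d s1 ≤ 32) (h1' : 32 < pvUnfavB d (s1 - 1))
    (h2 : pvUnfavB d s2 ≤ 32) (h2' : 32 < pvUnfavB d (s2 - 1)) : s1 = s2 := by
  rcases lt_trichotomy s1 s2 with h | h | h
  · have := pvG_mono d (show s1 ≤ s2 - 1 by omega)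
    rw [← pvUnfavB_eq, ← pvUnfavB_eq] at this
    omega
  · exact h
  · have := pvG_mono d (show s2 ≤ s1 - 1 by omega)
    rw [← pvUnfavB_eq, ← pvUnfavB_eq] at this
    omega

theorem compute_Rw_from_curve_spec : Claim_equal_compute_Rw_from_curve := by
  intro calc_curve freqs ref_curve _hdom hpre
  obtain ⟨hcl, hrl, hne⟩ := hpre
  unfold Spec_compute_Rw_from_curve
  simp only [compute_Rw_from_curve, compute_Rw_from_curve_alt]
  rw [pvBridge0]
  set d := (List.range freqs.length).map
    (fun i => PySem.List.pyGetD ref_curve (i : Int) 0 - PySem.List.pyGetD calc_curve (i : Int) 0) with hd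
  by_cases h32 : pvUnfavB d 0 ≤ 32
  · rw [if_pos h32, if_pos h32]
  · rw [if_neg h32, if_neg h32]
    have hupos : 32 < pvUnfavB d 0 := by omega
    have hbs : ∀ s : Int, pvUnfavA ((List.range freqs.length).map
        (fun i => PySem.List.pyGetD calc_curve (i : Int) 0 -
                  PySem.List.pyGetD (ref_curve.map (fun r => r - s)) (i : Int) 0)) = pvUnfavB d s := by
      intro s
      rw [pvDevs_eq calc_curve ref_curve hrl s, ← hd, pvBridge_fold]
    have htn : (pvUnfavB d 0).toNat = ((pvUnfavB d 0).toNat - 1) + 1 := by omega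
    have h1le : pvUnfavB d (0 + 1) ≤ 32 + (((pvUnfavB d 0).toNat - 1 : Nat) : Int) := by
      have hstep : pvUnfavB d (0 + 1) < pvUnfavB d 0 := by
        rw [pvUnfavB_eq, pvUnfavB_eq]
        exact pvG_strict d (by rw [← pvUnfavB_eq]; omega)
      omega
    rw [htn]
    obtain ⟨hA1, hA2, hA3, hA4⟩ :=
      pvLoopA_char calc_curve ref_curve freqs.length d hbs ((pvUnfavB d 0).toNat - 1) 0 h1le
    set p := pvLoopA calc_curve ref_curve freqs.length ((pvUnfavB d 0).toNat - 1 + 1) 0 with hp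
    obtain ⟨x, hxmem, hxpos⟩ := pvG_pos_mem d (s := 0) (by rw [← pvUnfavB_eq]; omega)
    set hi0 := (PySem.List.max? d (fun y => y)).getD 0 with hhi0
    have hmax : ∀ y ∈ d, y ≤ hi0 := by
      cases hmq : PySem.List.max? d (fun y => y) with
      | none =>
        exfalso
        have hd0 : d = [] := (PySem.List.max?_eq_none_iff d (fun y => y)).mp hmq
        rw [hd0] at hxmem
        simp at hxmem
      | some m =>
        intro y hy
        have := PySem.List.max?_isMax hmq y hy
        simpa [hhi0, hmq] using this
    have hhi0pos : 0 < hi0 := lt_of_lt_of_le hxpos (hmax x hxmem)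
    have hhi0le : pvUnfavB d hi0 ≤ 32 := by
      rw [pvUnfavB_eq, pvG_zero d hmax]
      omega
    obtain ⟨hB1, hB2, hB3, hB4⟩ :=
      pvBsearch_char d (hi0 - 0).toNat 0 hi0 le_rfl hhi0pos hupos hhi0le
    have hA1' : 32 < pvUnfavB d (p.1 - 1) := by
      by_cases hp1 : p.1 = 1
      · rw [hp1]
        simpa using hupos
      · exact hA4 (p.1 - 1) (by omega) (by omega)
    have hA2' : pvUnfavB d p.1 ≤ 32 := by rw [← hA1]; exact hA2
    have heq : p.1 = pvBsearch d (hi0 - 0).toNat 0 hi0 := pvUnique d hA2' hA1' hB3 hB4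
    have hdict : (if (pvRefDict.get? 500).isSome then (pvRefDict.get? 500).getD 0
        else (pvRefDict.get? ((PySem.List.min? pvRefDict.keys (fun y => y)).getD 0)).getD 0) = (52 : Int) := by
      decide
    rw [hdict, hA1, heq]
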